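-- pv_equiv track=rewrite | github.com/simba3447/algorithm-problem-solving | baekjoon/20529/20529.py | solution
-- ===== SOURCE A (Python) =====
-- def solution(n, mbti_list):
--     mbti_dict = {}
--     for mbti in mbti_list:
--         if mbti not in mbti_dict:
--             mbti_dict[mbti] = 0
--         if mbti_dict[mbti] < 3:
--             mbti_dict[mbti] += 1
--         else:
--             return 0
--
--     mbti_list = []
--     for mbti, cnt in mbti_dict.items():
--         for _ in range(cnt):
--             mbti_list.append(mbti)
--
--     n = len(mbti_list)
--     distances = [[0 for _ in range(n)] for _ in range(n)]
--     for i in range(n - 1):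
--         for j in range(i + 1, n):
--             for k in range(4):
--                 if mbti_list[i][k] != mbti_list[j][k]:
--                     distances[i][j] += 1
--
--     min_distance = 100
--
--     for i in range(n - 2):
--         for j in range(i + 1, n - 1):
--             for k in range(j + 1, n):
--                 min_distance = min(min_distance, distances[i][j] + distances[j][k] + distances[i][k])
--
--
--     return min_distance
-- ===== SOURCE B (Python) =====
-- def _combos2(xs):
--     if not xs:
--         return []
--     x, rest = xs[0], xs[1:]
--     return [(x, b) for b in rest] + _combos2(rest)
--
--
-- def _combos3(xs):
--     if not xs:
--         return []
--     x, rest = xs[0], xs[1:]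
--     return [(x, b, c) for (b, c) in _combos2(rest)] + _combos3(rest)
--
--
-- def _ham(a, b):
--     return sum(a[k] != b[k] for k in range(4))
--
--
-- def solution(n, mbti_list):
--     counts = {}
--     for m in mbti_list:
--         counts[m] = counts.get(m, 0) + 1
--     if any(c >= 4 for c in counts.values()):
--         return 0
--     people = [m for m, c in counts.items() for _ in range(c)]
--     best = 100
--     for a, b, c in _combos3(people):
--         best = min(best, _ham(a, b) + _ham(b, c) + _ham(a, c))
--     return best
-- ===== Notes on version B (the rewrite author's own statement) =====
-- stated objective: alternative
-- what changed: B counts occurrences in one dict pass (returning 0 when any type reaches 4), then enumerates 3-element combinations by structural recursion and computes the 4-char Hamming distances inline, eliminating A's precomputed n*n distance matrix and its index triple loops.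
import Mathlib
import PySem

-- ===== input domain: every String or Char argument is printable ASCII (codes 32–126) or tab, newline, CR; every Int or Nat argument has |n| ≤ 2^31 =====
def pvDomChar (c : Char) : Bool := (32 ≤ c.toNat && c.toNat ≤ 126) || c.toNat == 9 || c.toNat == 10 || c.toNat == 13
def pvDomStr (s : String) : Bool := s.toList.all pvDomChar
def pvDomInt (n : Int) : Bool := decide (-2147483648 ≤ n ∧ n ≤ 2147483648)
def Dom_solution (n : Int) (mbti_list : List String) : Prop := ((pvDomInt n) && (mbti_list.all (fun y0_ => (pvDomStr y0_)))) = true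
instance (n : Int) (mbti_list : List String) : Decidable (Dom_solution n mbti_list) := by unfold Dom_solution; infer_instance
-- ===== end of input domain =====

-- B replaces A's precomputed distance matrix and index triple loops by a one-pass
-- occurrence count and a recursive enumeration of 3-combinations with inline Hamming
-- distances (alternative decomposition, same asymptotic cost).


-- ===== PORT A =====

-- A's first loop: build the capped dict; `none` is the `return 0` branch
def aCount : PySem.Dict String Int → List String → Option (PySem.Dict String Int)
  | d, [] => some d
  | d, mbti :: rest =>
    let d1 := if (PySem.Dict.get? d mbti).isNone then PySem.Dict.insert d mbti 0 else d
    if PySem.Dict.getD d1 mbti 0 < 3 then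
      aCount (PySem.Dict.insert d1 mbti (PySem.Dict.getD d1 mbti 0 + 1)) rest
    else none

-- distances[i][j] read; i, j are always nonnegative in-range indices from range(); exact there
def mget (m : List (List Int)) (i j : Int) : Int :=
  PySem.List.pyGetD (PySem.List.pyGetD m i []) j 0

-- distances[i][j] = v write; same in-range indices; exact there
def mset (m : List (List Int)) (i j : Int) (v : Int) : List (List Int) :=
  m.modify i.toNat (fun row => row.set j.toNat v)

-- mbti_list[i][k] is compared as Option Char; Python raises IndexError on a string shorter
-- than 4 — exactly those inputs are excluded by Pre_solution, where both sides are `some`.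
def solution (n : Int) (mbti_list : List String) : Int :=
  match aCount PySem.Dict.empty mbti_list with
  | none => 0
  | some d =>
    let l := (PySem.Dict.items d).foldl
      (fun acc p => (PySem.List.pyRange 0 p.2).foldl (fun a _ => a ++ [p.1]) acc) []
    let n2 : Int := (l.length : Int)
    let dist :=
      (PySem.List.pyRange 0 (n2 - 1)).foldl (fun m i =>
        (PySem.List.pyRange (i + 1) n2).foldl (fun m j =>
          (PySem.List.pyRange 0 4).foldl (fun m k =>
            if PySem.Str.pyGet? (PySem.List.pyGetD l i "") k ≠ PySem.Str.pyGet? (PySem.List.pyGetD l j "") k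
            then mset m i j (mget m i j + 1) else m) m) m)
        ((PySem.List.pyRange 0 n2).map (fun _ => (PySem.List.pyRange 0 n2).map (fun _ => (0 : Int))))
    (PySem.List.pyRange 0 (n2 - 2)).foldl (fun best i =>
      (PySem.List.pyRange (i + 1) (n2 - 1)).foldl (fun best j =>
        (PySem.List.pyRange (j + 1) n2).foldl (fun best k =>
          min best (mget dist i j + mget dist j k + mget dist i k)) best) best) 100

-- ===== PORT B =====

def bCounts (mbti_list : List String) : PySem.Dict String Int :=
  mbti_list.foldl (fun d m => PySem.Dict.insert d m (PySem.Dict.getD d m 0 + 1)) PySem.Dict.empty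

-- sum(a[k] != b[k] for k in range(4)); Python raises on strings shorter than 4 (outside Pre_)
def bHam (a b : String) : Int :=
  ((PySem.List.pyRange 0 4).map
    (fun k => if PySem.Str.pyGet? a k ≠ PySem.Str.pyGet? b k then (1 : Int) else 0)).sum

def bCombos2 : List String → List (String × String)
  | [] => []
  | x :: rest => rest.map (fun b => (x, b)) ++ bCombos2 rest

def bCombos3 : List String → List (String × String × String)
  | [] => []
  | x :: rest => (bCombos2 rest).map (fun p => (x, p.1, p.2)) ++ bCombos3 rest

def solution_alt (n : Int) (mbti_list : List String) : Int :=
  let counts := bCounts mbti_list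
  if (PySem.Dict.values counts).any (fun c => decide (4 ≤ c)) then 0
  else
    let people := (PySem.Dict.items counts).flatMap
      (fun p => (PySem.List.pyRange 0 p.2).map (fun _ => p.1))
    (bCombos3 people).foldl
      (fun best t => min best (bHam t.1 t.2.1 + bHam t.2.1 t.2.2 + bHam t.1 t.2.2)) 100

-- ===== PRECONDITION & SPEC =====
-- Pre_ excludes exactly the inputs where A raises IndexError (some string shorter than 4
-- reaches the distance table, i.e. no early 0 and at least two entries); it admits every
-- input on which A returns.
def Pre_solution (n : Int) (mbti_list : List String) : Prop :=
  mbti_list.length ≤ 1 ∨ (∃ s ∈ mbti_list, 4 ≤ mbti_list.count s) ∨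
    (∀ s ∈ mbti_list, 4 ≤ s.toList.length)
instance (n : Int) (mbti_list : List String) : Decidable (Pre_solution n mbti_list) := by
  unfold Pre_solution; infer_instance

def pvWitness_solution : Int × List String := (3, ["INTP", "ENTJ", "ISFJ"])

def Spec_solution (n : Int) (mbti_list : List String) (out : Int) : Prop := out = solution_alt n mbti_list
instance (n : Int) (mbti_list : List String) (out : Int) : Decidable (Spec_solution n mbti_list out) := by unfold Spec_solution; infer_instance

-- ===== CLAIM (what is proved, stated in full; the proofs are below) =====
def Claim_equal_solution : Prop := ∀ (n : Int) (mbti_list : List String), Dom_solution n mbti_list → Pre_solution n mbti_list → Spec_solution n mbti_list (solution n mbti_list)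

-- ===== LEMMAS AND PROOFS =====

-- ---- phase 1: A's capped dict loop vs B's plain counter ----

theorem insert_insert_self (d : PySem.Dict String Int) (k : String) (v w : Int) :
    (d.insert k v).insert k w = d.insert k w := by
  apply PySem.Dict.ext
  by_cases h : d.contains k = true
  · rw [PySem.Dict.items_insert_of_contains _ _ (PySem.Dict.contains_insert_self d k v),
        PySem.Dict.items_insert_of_contains _ _ h, PySem.Dict.items_insert_of_contains _ _ h,
        List.map_map]
    apply List.map_congr_left
    intro p _
    by_cases hpk : p.1 = k <;> simp [hpk]
  · have h2 : d.contains k = false := by simpa using h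
    obtain ⟨ps⟩ := d
    rw [PySem.Dict.items_insert_of_contains _ _ (PySem.Dict.contains_insert_self _ k v),
        PySem.Dict.items_insert_of_not_contains _ _ h2,
        PySem.Dict.items_insert_of_not_contains _ _ h2, List.map_append]
    rw [PySem.Dict.contains_mk] at h2
    congr 1
    · have hid : List.map (fun p => if (p.1 == k) = true then (k, w) else p) ps = ps := by
        conv_rhs => rw [← List.map_id ps]
        apply List.map_congr_left
        intro p hp
        have hfalse : (p.1 == k) = false := by
          rw [List.any_eq_false] at h2
          simpa using h2 p hp
        simp [hfalse]
      simpa using hid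
    · simp

theorem aCount_eq (rest : List String) (d : PySem.Dict String Int)
    (hnd : (PySem.Dict.keys d).Nodup)
    (hinv : ∀ k, PySem.Dict.getD d k 0 ≤ 3) :
    aCount d rest =
      (if (PySem.Dict.values (rest.foldl (fun d m => PySem.Dict.insert d m (PySem.Dict.getD d m 0 + 1)) d)).any (fun c => decide (4 ≤ c)) = true
       then none
       else some (rest.foldl (fun d m => PySem.Dict.insert d m (PySem.Dict.getD d m 0 + 1)) d)) := by
  induction rest generalizing d with
  | nil =>
    have hfalse : ¬ ((PySem.Dict.values d).any (fun c => decide (4 ≤ c)) = true) := by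
      rw [List.any_eq_true]
      rintro ⟨v, hv, hv4⟩
      rw [PySem.Dict.values_eq_map_keys d hnd 0] at hv
      obtain ⟨k, -, rfl⟩ := List.mem_map.mp hv
      exact absurd (hinv k) (by simpa using hv4)
    simp [aCount, hfalse]
  | cons m rest ih =>
    have hg1 : PySem.Dict.getD (if (PySem.Dict.get? d m).isNone then PySem.Dict.insert d m 0 else d) m 0
        = PySem.Dict.getD d m 0 := by
      by_cases hc : (PySem.Dict.get? d m).isNone
      · rw [if_pos hc, PySem.Dict.getD_insert_self,
            PySem.Dict.getD_of_get?_eq_none d 0 (Option.isNone_iff_eq_none.mp hc)]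
      · rw [if_neg hc]
    have hg2 : PySem.Dict.insert (if (PySem.Dict.get? d m).isNone then PySem.Dict.insert d m 0 else d) m
        (PySem.Dict.getD d m 0 + 1) = PySem.Dict.insert d m (PySem.Dict.getD d m 0 + 1) := by
      by_cases hc : (PySem.Dict.get? d m).isNone
      · rw [if_pos hc, insert_insert_self]
      · rw [if_neg hc]
    by_cases hlt : PySem.Dict.getD d m 0 < 3
    · have step : aCount d (m :: rest)
          = aCount (PySem.Dict.insert d m (PySem.Dict.getD d m 0 + 1)) rest := by
        show (let d1 := if (PySem.Dict.get? d m).isNone then PySem.Dict.insert d m 0 else d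
              if PySem.Dict.getD d1 m 0 < 3 then
                aCount (PySem.Dict.insert d1 m (PySem.Dict.getD d1 m 0 + 1)) rest
              else none) = _
        simp only [hg1, hg2, if_pos hlt]
      rw [step, List.foldl_cons]
      exact ih _ (PySem.Dict.nodup_keys_insert _ _ _ hnd) (fun k => by
        rw [PySem.Dict.getD_insert]
        split
        · omega
        · exact hinv k)
    · have step : aCount d (m :: rest) = none := by
        show (let d1 := if (PySem.Dict.get? d m).isNone then PySem.Dict.insert d m 0 else d
              if PySem.Dict.getD d1 m 0 < 3 then
                aCount (PySem.Dict.insert d1 m (PySem.Dict.getD d1 m 0 + 1)) rest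
              else none) = _
        simp only [hg1, hg2, if_neg hlt]
      set F := (m :: rest).foldl (fun d m => PySem.Dict.insert d m (PySem.Dict.getD d m 0 + 1)) d with hF
      have hgF : PySem.Dict.getD F m 0 = PySem.Dict.getD d m 0 + ((m :: rest).count m : Int) :=
        PySem.Dict.getD_foldl_insert_add_one _ d m
      have h4 : 4 ≤ PySem.Dict.getD F m 0 := by
        have hmle := hinv m
        have hcnt : 1 ≤ (m :: rest).count m := by
          have hcc : List.count m (m :: rest) = List.count m rest + 1 := List.count_cons_self
          omega
        omega
      have hndF : (PySem.Dict.keys F).Nodup :=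
        PySem.Dict.nodup_keys_foldl_insert _ _ d hnd
      have hmemF : m ∈ PySem.Dict.keys F := by
        by_contra hmm
        rw [PySem.Dict.getD_of_get?_eq_none F 0
          ((PySem.Dict.get?_eq_none_iff_not_mem_keys F m).mpr hmm)] at h4
        omega
      have hany : (PySem.Dict.values F).any (fun c => decide (4 ≤ c)) = true := by
        rw [List.any_eq_true]
        refine ⟨PySem.Dict.getD F m 0, ?_, by simpa using h4⟩
        rw [PySem.Dict.values_eq_map_keys F hndF 0]
        exact List.mem_map.mpr ⟨m, hmemF, rfl⟩
      rw [step, if_pos hany]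

-- ---- generic foldl-min toolkit ----

theorem foldl_min_le_init (L : List Int) (a : Int) : L.foldl min a ≤ a := by
  induction L generalizing a with
  | nil => simp
  | cons x L ih => exact le_trans (ih (min a x)) (min_le_left a x)

theorem foldl_min_le_mem (L : List Int) (a v : Int) (h : v ∈ L) : L.foldl min a ≤ v := by
  induction L generalizing a with
  | nil => simp at h
  | cons x L ih =>
    rcases List.mem_cons.mp h with rfl | hm
    · exact le_trans (foldl_min_le_init L (min a v)) (min_le_right a v)
    · exact ih (min a x) hm

theorem foldl_min_cases (L : List Int) (a : Int) : L.foldl min a = a ∨ L.foldl min a ∈ L := by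
  induction L generalizing a with
  | nil => simp
  | cons x L ih =>
    rcases ih (min a x) with h | h
    · rcases min_choice a x with hm | hm
      · left; rw [List.foldl_cons, h, hm]
      · right; rw [List.foldl_cons, h, hm]; exact List.mem_cons_self
    · right; exact List.mem_cons_of_mem _ h

theorem foldl_min_eq_of_mem_iff (L1 L2 : List Int) (a : Int)
    (h : ∀ v, v ∈ L1 ↔ v ∈ L2) : L1.foldl min a = L2.foldl min a := by
  apply le_antisymm
  · rcases foldl_min_cases L2 a with h2 | h2
    · rw [h2]; exact foldl_min_le_init L1 a
    · exact foldl_min_le_mem L1 a _ ((h _).mpr h2)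
  · rcases foldl_min_cases L1 a with h1 | h1
    · rw [h1]; exact foldl_min_le_init L2 a
    · exact foldl_min_le_mem L2 a _ ((h _).mp h1)

theorem foldl_flatMap2 {α β γ : Type} (f : α → List γ) (g : β → γ → β)
    (L : List α) (a : β) :
    (L.flatMap f).foldl g a = L.foldl (fun b x => (f x).foldl g b) a := by
  rw [List.flatMap_def, List.foldl_flatten, List.foldl_map]

theorem nodup_pyRange (a b : Int) : (PySem.List.pyRange a b).Nodup := by
  have H : ∀ (n : Nat) (a : Int), (b - a).toNat ≤ n → (PySem.List.pyRange a b).Nodup := by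
    intro n
    induction n with
    | zero =>
      intro a h
      have he : PySem.List.pyRange a b = [] := by
        rw [List.eq_nil_iff_forall_not_mem]
        intro x hx
        rw [PySem.List.mem_pyRange_one] at hx
        omega
      simp [he]
    | succ n ih =>
      intro a h
      by_cases hab : a < b
      · rw [PySem.List.pyRange_one_cons hab, List.nodup_cons]
        refine ⟨?_, ih (a + 1) (by omega)⟩
        intro hmem
        rw [PySem.List.mem_pyRange_one] at hmem
        omega
      · have he : PySem.List.pyRange a b = [] := by
          rw [List.eq_nil_iff_forall_not_mem]
          intro x hx
          rw [PySem.List.mem_pyRange_one] at hx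
          omega
        simp [he]
  exact H (b - a).toNat a le_rfl

-- ---- matrix characterisation ----

def ShapeN (N : Nat) (m : List (List Int)) : Prop :=
  m.length = N ∧ ∀ (a : Nat) (h : a < m.length), (m[a]'h).length = N

theorem mget_eq_getElem (m : List (List Int)) (i j : Int) (hi : 0 ≤ i) (hj : 0 ≤ j)
    (hi2 : i.toNat < m.length) (hj2 : j.toNat < (m[i.toNat]'hi2).length) :
    mget m i j = (m[i.toNat]'hi2)[j.toNat]'hj2 := by
  unfold mget
  rw [PySem.List.pyGetD_of_nonneg _ _ hi, List.getD_eq_getElem _ _ hi2,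
      PySem.List.pyGetD_of_nonneg _ _ hj, List.getD_eq_getElem _ _ hj2]

theorem shape_mset {N : Nat} (m : List (List Int)) (i j : Int) (v : Int)
    (hs : ShapeN N m) : ShapeN N (mset m i j v) := by
  obtain ⟨h1, h2⟩ := hs
  refine ⟨by simpa [mset] using h1, ?_⟩
  intro a ha
  have ha2 : a < m.length := by simpa [mset] using ha
  unfold mset
  rw [List.getElem_modify]
  split
  · rw [List.length_set]; exact h2 a ha2
  · exact h2 a ha2

theorem mget_mset {N : Nat} (m : List (List Int)) (i j i' j' : Int) (v : Int)
    (hs : ShapeN N m) (hi : 0 ≤ i) (hj : 0 ≤ j) (hiN : i < (N : Int)) (hjN : j < (N : Int))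
    (hi' : 0 ≤ i') (hj' : 0 ≤ j') (hiN' : i' < (N : Int)) (hjN' : j' < (N : Int)) :
    mget (mset m i j v) i' j' = if i = i' ∧ j = j' then v else mget m i' j' := by
  obtain ⟨hml, hrow⟩ := hs
  have hiL : i.toNat < m.length := by omega
  have hiL' : i'.toNat < m.length := by omega
  have hjL' : j'.toNat < (m[i'.toNat]'hiL').length := by
    have := hrow i'.toNat hiL'
    omega
  have hmsL : i'.toNat < (mset m i j v).length := by
    simpa [mset] using hiL'
  have hmsRow : ((mset m i j v)[i'.toNat]'hmsL) =
      if i.toNat = i'.toNat then (m[i'.toNat]'hiL').set j.toNat v else m[i'.toNat]'hiL' := by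
    simp [mset, List.getElem_modify]
  by_cases hii : i.toNat = i'.toNat
  · have hjL2 : j'.toNat < ((mset m i j v)[i'.toNat]'hmsL).length := by
      rw [hmsRow, if_pos hii, List.length_set]
      exact hjL'
    rw [mget_eq_getElem _ _ _ hi' hj' hmsL hjL2,
        mget_eq_getElem m i' j' hi' hj' hiL' hjL']
    have hval : ((mset m i j v)[i'.toNat]'hmsL)[j'.toNat]'hjL2 =
        if j.toNat = j'.toNat then v else (m[i'.toNat]'hiL')[j'.toNat]'hjL' := by
      have h3 := hmsRow
      rw [if_pos hii] at h3
      simp only [h3]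
      rw [List.getElem_set]
    rw [hval]
    by_cases hjj : j.toNat = j'.toNat
    · rw [if_pos hjj, if_pos ⟨by omega, by omega⟩]
    · rw [if_neg hjj, if_neg (by rintro ⟨ha, hb⟩; exact hjj (by omega))]
  · have hjL2 : j'.toNat < ((mset m i j v)[i'.toNat]'hmsL).length := by
      rw [hmsRow, if_neg hii]
      exact hjL'
    rw [mget_eq_getElem _ _ _ hi' hj' hmsL hjL2,
        mget_eq_getElem m i' j' hi' hj' hiL' hjL']
    have hval : ((mset m i j v)[i'.toNat]'hmsL)[j'.toNat]'hjL2 = (m[i'.toNat]'hiL')[j'.toNat]'hjL' := by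
      have h3 := hmsRow
      rw [if_neg hii] at h3
      simp only [h3]
    rw [hval, if_neg (by rintro ⟨ha, hb⟩; exact hii (by omega))]

theorem mget_mset_self {N : Nat} (m : List (List Int)) (i j : Int) (v : Int)
    (hs : ShapeN N m) (hi : 0 ≤ i) (hij : i < j) (hj : j < (N : Int)) :
    mget (mset m i j v) i j = v := by
  rw [mget_mset m i j i j v hs hi (by omega) (by omega) hj hi (by omega) (by omega) hj,
      if_pos ⟨rfl, rfl⟩]

theorem mget_mset_other {N : Nat} (m : List (List Int)) (i j i' j' : Int) (v : Int)
    (hs : ShapeN N m) (hi : 0 ≤ i) (hij : i < j) (hj : j < (N : Int))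
    (hi' : 0 ≤ i') (hij' : i' < j') (hj' : j' < (N : Int))
    (hne : (i, j) ≠ (i', j')) :
    mget (mset m i j v) i' j' = mget m i' j' := by
  rw [mget_mset m i j i' j' v hs hi (by omega) (by omega) hj hi' (by omega) (by omega) hj']
  rw [if_neg]
  rintro ⟨h1, h2⟩
  exact hne (by rw [h1, h2])

-- the inner k-loop of A's table builder, for one pair of strings
def kStep (a b : String) (i j : Int) (m : List (List Int)) : List (List Int) :=
  (PySem.List.pyRange 0 4).foldl (fun m k =>
    if PySem.Str.pyGet? a k ≠ PySem.Str.pyGet? b k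
    then mset m i j (mget m i j + 1) else m) m

theorem kfold_shape {N : Nat} (a b : String) (i j : Int) (ks : List Int) (m : List (List Int))
    (hs : ShapeN N m) :
    ShapeN N (ks.foldl (fun m k =>
      if PySem.Str.pyGet? a k ≠ PySem.Str.pyGet? b k
      then mset m i j (mget m i j + 1) else m) m) := by
  induction ks generalizing m with
  | nil => exact hs
  | cons k ks ih =>
    rw [List.foldl_cons]
    refine ih _ ?_
    split
    · exact shape_mset m i j _ hs
    · exact hs

theorem shape_kStep {N : Nat} (a b : String) (i j : Int) (m : List (List Int))
    (hs : ShapeN N m) : ShapeN N (kStep a b i j m) :=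
  kfold_shape a b i j _ m hs

theorem mget_kStep_self {N : Nat} (a b : String) (i j : Int) (m : List (List Int))
    (hs : ShapeN N m) (hi : 0 ≤ i) (hij : i < j) (hj : j < (N : Int)) :
    mget (kStep a b i j m) i j = mget m i j + bHam a b := by
  have H : ∀ (ks : List Int) (m : List (List Int)), ShapeN N m →
      mget (ks.foldl (fun m k =>
        if PySem.Str.pyGet? a k ≠ PySem.Str.pyGet? b k
        then mset m i j (mget m i j + 1) else m) m) i j
      = mget m i j + (ks.map (fun k =>
          if PySem.Str.pyGet? a k ≠ PySem.Str.pyGet? b k then (1 : Int) else 0)).sum := by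
    intro ks
    induction ks with
    | nil => intro m _; simp
    | cons k ks ih =>
      intro m hsm
      rw [List.foldl_cons, List.map_cons, List.sum_cons]
      by_cases hk : PySem.Str.pyGet? a k ≠ PySem.Str.pyGet? b k
      · rw [if_pos hk, if_pos hk, ih _ (shape_mset m i j _ hsm),
            mget_mset_self m i j _ hsm hi hij hj]
        ring
      · rw [if_neg hk, if_neg hk, ih _ hsm]
        ring
  exact H _ m hs

theorem mget_kStep_other {N : Nat} (a b : String) (i j i' j' : Int) (m : List (List Int))
    (hs : ShapeN N m) (hi : 0 ≤ i) (hij : i < j) (hj : j < (N : Int))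
    (hi' : 0 ≤ i') (hij' : i' < j') (hj' : j' < (N : Int))
    (hne : (i, j) ≠ (i', j')) :
    mget (kStep a b i j m) i' j' = mget m i' j' := by
  have H : ∀ (ks : List Int) (m : List (List Int)), ShapeN N m →
      mget (ks.foldl (fun m k =>
        if PySem.Str.pyGet? a k ≠ PySem.Str.pyGet? b k
        then mset m i j (mget m i j + 1) else m) m) i' j'
      = mget m i' j' := by
    intro ks
    induction ks with
    | nil => intro m _; simp
    | cons k ks ih =>
      intro m hsm
      rw [List.foldl_cons]
      by_cases hk : PySem.Str.pyGet? a k ≠ PySem.Str.pyGet? b k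
      · rw [if_pos hk, ih _ (shape_mset m i j _ hsm),
            mget_mset_other m i j i' j' _ hsm hi hij hj hi' hij' hj' hne]
      · rw [if_neg hk, ih _ hsm]
  exact H _ m hs

-- the pair fold: A's two outer loops of the table builder, flattened
theorem pairfold_mget_other {N : Nat} (l : List String) (P : List (Int × Int)) (m : List (List Int))
    (i j : Int) (hs : ShapeN N m)
    (hP : ∀ p ∈ P, 0 ≤ p.1 ∧ p.1 < p.2 ∧ p.2 < (N : Int))
    (hi : 0 ≤ i) (hij : i < j) (hj : j < (N : Int))
    (hnm : (i, j) ∉ P) :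
    mget (P.foldl (fun m p =>
      kStep (PySem.List.pyGetD l p.1 "") (PySem.List.pyGetD l p.2 "") p.1 p.2 m) m) i j
      = mget m i j := by
  induction P generalizing m with
  | nil => rfl
  | cons p P ih =>
    rw [List.foldl_cons]
    have hp := hP p List.mem_cons_self
    have hpne : (p.1, p.2) ≠ (i, j) := by
      intro hc
      exact hnm (by rw [List.mem_cons]; left; rw [← hc])
    rw [ih _ (shape_kStep _ _ _ _ _ hs) (fun q hq => hP q (List.mem_cons_of_mem _ hq))
          (fun hc => hnm (List.mem_cons_of_mem _ hc)),
        mget_kStep_other _ _ p.1 p.2 i j m hs hp.1 hp.2.1 hp.2.2 hi hij hj hpne]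

theorem pairfold_mget {N : Nat} (l : List String) (P : List (Int × Int)) (m : List (List Int))
    (i j : Int) (hs : ShapeN N m)
    (hP : ∀ p ∈ P, 0 ≤ p.1 ∧ p.1 < p.2 ∧ p.2 < (N : Int))
    (hnd : P.Nodup) (hmem : (i, j) ∈ P)
    (hi : 0 ≤ i) (hij : i < j) (hj : j < (N : Int)) :
    mget (P.foldl (fun m p =>
      kStep (PySem.List.pyGetD l p.1 "") (PySem.List.pyGetD l p.2 "") p.1 p.2 m) m) i j
      = mget m i j + bHam (PySem.List.pyGetD l i "") (PySem.List.pyGetD l j "") := by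
  induction P generalizing m with
  | nil => simp at hmem
  | cons p P ih =>
    rw [List.foldl_cons]
    rcases List.mem_cons.mp hmem with heq | hmem2
    · have hnin : (i, j) ∉ P := by
        intro hc
        exact (List.nodup_cons.mp hnd).1 (heq ▸ hc)
      have hp1 : p.1 = i := by rw [← heq]
      have hp2 : p.2 = j := by rw [← heq]
      rw [hp1, hp2,
          pairfold_mget_other l P _ i j (shape_kStep _ _ _ _ _ hs)
            (fun q hq => hP q (List.mem_cons_of_mem _ hq)) hi hij hj hnin,
          mget_kStep_self _ _ i j m hs hi hij hj]
    · have hp := hP p List.mem_cons_self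
      have hpne : (p.1, p.2) ≠ (i, j) := by
        intro hc
        apply (List.nodup_cons.mp hnd).1
        have hpij : p = (i, j) := by rw [← hc]
        rw [hpij]
        exact hmem2
      rw [ih _ (shape_kStep _ _ _ _ _ hs) (fun q hq => hP q (List.mem_cons_of_mem _ hq))
            (List.nodup_cons.mp hnd).2 hmem2,
          mget_kStep_other _ _ p.1 p.2 i j m hs hp.1 hp.2.1 hp.2.2 hi hij hj hpne]

-- ---- combination enumeration characterised by indices ----

theorem mem_bCombos2 (l : List String) (p : String × String) :
    p ∈ bCombos2 l ↔ ∃ i j : Nat, i < j ∧ j < l.length ∧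
      p = (l.getD i "", l.getD j "") := by
  induction l with
  | nil =>
    simp only [bCombos2, List.not_mem_nil, false_iff]
    rintro ⟨i, j, h1, h2, -⟩
    simp at h2
  | cons x xs ih =>
    simp only [bCombos2, List.mem_append, List.mem_map, ih]
    constructor
    · rintro (⟨b, hb, rfl⟩ | ⟨i, j, h1, h2, rfl⟩)
      · obtain ⟨jx, hjx, rfl⟩ := List.mem_iff_getElem.mp hb
        refine ⟨0, jx + 1, by omega, by simp; omega, ?_⟩
        rw [List.getD_cons_zero, List.getD_cons_succ, List.getD_eq_getElem _ _ hjx]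
      · exact ⟨i + 1, j + 1, by omega, by simp; omega, by simp [List.getD_cons_succ]⟩
    · rintro ⟨i, j, h1, h2, rfl⟩
      cases j with
      | zero => omega
      | succ j' =>
        cases i with
        | zero =>
          left
          have hj' : j' < xs.length := by simp at h2; omega
          exact ⟨xs.getD j' "", by rw [List.getD_eq_getElem _ _ hj']; exact List.getElem_mem hj',
            by simp [List.getD_cons_succ]⟩
        | succ i' =>
          right
          exact ⟨i', j', by omega, by simp at h2; omega, by simp [List.getD_cons_succ]⟩

theorem mem_bCombos3 (l : List String) (t : String × String × String) :
    t ∈ bCombos3 l ↔ ∃ i j k : Nat, i < j ∧ j < k ∧ k < l.length ∧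
      t = (l.getD i "", l.getD j "", l.getD k "") := by
  induction l with
  | nil =>
    simp only [bCombos3, List.not_mem_nil, false_iff]
    rintro ⟨i, j, k, h1, h2, h3, -⟩
    simp at h3
  | cons x xs ih =>
    simp only [bCombos3, List.mem_append, List.mem_map, ih]
    constructor
    · rintro (⟨p, hp, rfl⟩ | ⟨i, j, k, h1, h2, h3, rfl⟩)
      · obtain ⟨i, j, h1, h2, rfl⟩ := (mem_bCombos2 xs p).mp hp
        exact ⟨0, i + 1, j + 1, by omega, by omega, by simp; omega,
          by simp [List.getD_cons_succ]⟩
      · exact ⟨i + 1, j + 1, k + 1, by omega, by omega, by simp; omega,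
          by simp [List.getD_cons_succ]⟩
    · rintro ⟨i, j, k, h1, h2, h3, rfl⟩
      cases k with
      | zero => omega
      | succ k' =>
        cases j with
        | zero => omega
        | succ j' =>
          cases i with
          | zero =>
            left
            have hk' : k' < xs.length := by simp at h3; omega
            refine ⟨(xs.getD j' "", xs.getD k' ""), ?_, by simp [List.getD_cons_succ]⟩
            exact (mem_bCombos2 xs _).mpr ⟨j', k', by omega, hk', rfl⟩
          | succ i' =>
            right
            exact ⟨i', j', k', by omega, by omega, by simp at h3; omega,
              by simp [List.getD_cons_succ]⟩

-- ---- main equivalence on the capped list ----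

theorem min_part_eq (l : List String) : (let n2 : Int := (l.length : Int);
    let dist :=
      (PySem.List.pyRange 0 (n2 - 1)).foldl (fun m i =>
        (PySem.List.pyRange (i + 1) n2).foldl (fun m j =>
          (PySem.List.pyRange 0 4).foldl (fun m k =>
            if PySem.Str.pyGet? (PySem.List.pyGetD l i "") k ≠ PySem.Str.pyGet? (PySem.List.pyGetD l j "") k
            then mset m i j (mget m i j + 1) else m) m) m)
        ((PySem.List.pyRange 0 n2).map (fun _ => (PySem.List.pyRange 0 n2).map (fun _ => (0 : Int))))
    (PySem.List.pyRange 0 (n2 - 2)).foldl (fun best i =>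
      (PySem.List.pyRange (i + 1) (n2 - 1)).foldl (fun best j =>
        (PySem.List.pyRange (j + 1) n2).foldl (fun best k =>
          min best (mget dist i j + mget dist j k + mget dist i k)) best) best) 100)
    = (bCombos3 l).foldl
        (fun best t => min best (bHam t.1 t.2.1 + bHam t.2.1 t.2.2 + bHam t.1 t.2.2)) 100 := by
  dsimp only
  have hlen : (PySem.List.pyRange 0 (l.length : Int)).length = l.length := by
    rw [PySem.List.pyRange_zero_natCast]
    simp
  set dist0 : List (List Int) :=
    (PySem.List.pyRange 0 ((l.length : Int))).map
      (fun _ => (PySem.List.pyRange 0 ((l.length : Int))).map (fun _ => (0 : Int))) with hd0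
  have hshape0 : ShapeN l.length dist0 := by
    refine ⟨by simp [hd0, hlen], ?_⟩
    intro a ha
    simp [hd0, hlen]
  have hzero : ∀ i j : Int, 0 ≤ i → 0 ≤ j → i < (l.length : Int) → j < (l.length : Int) →
      mget dist0 i j = 0 := by
    intro i j hi hj hiN hjN
    have h1 : i.toNat < dist0.length := by
      have := hshape0.1
      omega
    have h2 : j.toNat < (dist0[i.toNat]'h1).length := by
      have := hshape0.2 i.toNat h1
      omega
    rw [mget_eq_getElem dist0 i j hi hj h1 h2]
    simp [hd0]
  set P : List (Int × Int) :=
    (PySem.List.pyRange 0 ((l.length : Int) - 1)).flatMap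
      (fun i => (PySem.List.pyRange (i + 1) (l.length : Int)).map (fun j => (i, j))) with hP
  have hPbounds : ∀ p ∈ P, 0 ≤ p.1 ∧ p.1 < p.2 ∧ p.2 < (l.length : Int) := by
    intro p hp
    rw [hP] at hp
    simp only [List.mem_flatMap, List.mem_map, PySem.List.mem_pyRange_one] at hp
    obtain ⟨i, hi, j, hj, rfl⟩ := hp
    refine ⟨by omega, by omega, by omega⟩
  have hPnodup : P.Nodup := by
    rw [hP, List.nodup_flatMap]
    constructor
    · intro i _
      exact (nodup_pyRange _ _).map (fun a b hab => by
        simpa using congrArg Prod.snd hab)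
    · apply List.Pairwise.imp ?_ (nodup_pyRange 0 ((l.length : Int) - 1))
      intro a b hab x hxa hxb
      simp only [List.mem_map] at hxa hxb
      obtain ⟨ja, -, rfl⟩ := hxa
      obtain ⟨jb, -, heq⟩ := hxb
      exact hab (congrArg Prod.fst heq).symm
  have hdist : (PySem.List.pyRange 0 ((l.length : Int) - 1)).foldl (fun m i =>
        (PySem.List.pyRange (i + 1) (l.length : Int)).foldl (fun m j =>
          (PySem.List.pyRange 0 4).foldl (fun m k =>
            if PySem.Str.pyGet? (PySem.List.pyGetD l i "") k ≠ PySem.Str.pyGet? (PySem.List.pyGetD l j "") k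
            then mset m i j (mget m i j + 1) else m) m) m) dist0
      = P.foldl (fun m p =>
          kStep (PySem.List.pyGetD l p.1 "") (PySem.List.pyGetD l p.2 "") p.1 p.2 m) dist0 := by
    rw [hP, foldl_flatMap2]
    simp only [List.foldl_map]
    rfl
  rw [hdist]
  set D : List (List Int) := P.foldl (fun m p =>
      kStep (PySem.List.pyGetD l p.1 "") (PySem.List.pyGetD l p.2 "") p.1 p.2 m) dist0 with hD
  have hentry : ∀ a b : Int, 0 ≤ a → a < b → b < (l.length : Int) →
      mget D a b = bHam (PySem.List.pyGetD l a "") (PySem.List.pyGetD l b "") := by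
    intro a b ha hab hb
    have hmemP : (a, b) ∈ P := by
      rw [hP]
      simp only [List.mem_flatMap, List.mem_map, PySem.List.mem_pyRange_one]
      exact ⟨a, ⟨ha, by omega⟩, b, ⟨by omega, hb⟩, rfl⟩
    rw [hD, pairfold_mget l P dist0 a b hshape0 hPbounds hPnodup hmemP ha hab hb,
        hzero a b ha (by omega) (by omega) hb, zero_add]
  -- flatten A's triple min loop
  set LA : List Int :=
    (PySem.List.pyRange 0 ((l.length : Int) - 2)).flatMap (fun i =>
      (PySem.List.pyRange (i + 1) ((l.length : Int) - 1)).flatMap (fun j =>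
        (PySem.List.pyRange (j + 1) (l.length : Int)).map (fun k =>
          mget D i j + mget D j k + mget D i k))) with hLA
  have hA : LA.foldl min 100 =
      (PySem.List.pyRange 0 ((l.length : Int) - 2)).foldl (fun best i =>
        (PySem.List.pyRange (i + 1) ((l.length : Int) - 1)).foldl (fun best j =>
          (PySem.List.pyRange (j + 1) (l.length : Int)).foldl (fun best k =>
            min best (mget D i j + mget D j k + mget D i k)) best) best) 100 := by
    rw [hLA]
    simp only [foldl_flatMap2, List.foldl_map]
  set LB : List Int := (bCombos3 l).map
    (fun t => bHam t.1 t.2.1 + bHam t.2.1 t.2.2 + bHam t.1 t.2.2) with hLB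
  have hB : LB.foldl min 100 = (bCombos3 l).foldl
      (fun best t => min best (bHam t.1 t.2.1 + bHam t.2.1 t.2.2 + bHam t.1 t.2.2)) 100 := by
    rw [hLB, List.foldl_map]
  have hmem : ∀ v, v ∈ LA ↔ v ∈ LB := by
    intro v
    rw [hLA, hLB]
    simp only [List.mem_flatMap, List.mem_map, PySem.List.mem_pyRange_one]
    constructor
    · rintro ⟨i, hi, j, hj, k, hk, rfl⟩
      refine ⟨(l.getD i.toNat "", l.getD j.toNat "", l.getD k.toNat ""), ?_, ?_⟩
      · exact (mem_bCombos3 l _).mpr ⟨i.toNat, j.toNat, k.toNat, by omega, by omega, by omega, rfl⟩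
      · rw [hentry i j (by omega) (by omega) (by omega),
           hentry j k (by omega) (by omega) (by omega),
           hentry i k (by omega) (by omega) (by omega)]
        rw [PySem.List.pyGetD_of_nonneg _ _ (by omega : (0:Int) ≤ i),
            PySem.List.pyGetD_of_nonneg _ _ (by omega : (0:Int) ≤ j),
            PySem.List.pyGetD_of_nonneg _ _ (by omega : (0:Int) ≤ k)]
    · rintro ⟨t, ht, rfl⟩
      obtain ⟨i, j, k, hij, hjk, hkN, rfl⟩ := (mem_bCombos3 l t).mp ht
      refine ⟨(i : Int), ⟨by omega, by omega⟩, (j : Int), ⟨by omega, by omega⟩,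
        (k : Int), ⟨by omega, by omega⟩, ?_⟩
      rw [hentry (i : Int) (j : Int) (by omega) (by omega) (by omega),
          hentry (j : Int) (k : Int) (by omega) (by omega) (by omega),
          hentry (i : Int) (k : Int) (by omega) (by omega) (by omega)]
      rw [PySem.List.pyGetD_of_nonneg _ _ (by omega : (0:Int) ≤ (i : Int)),
          PySem.List.pyGetD_of_nonneg _ _ (by omega : (0:Int) ≤ (j : Int)),
          PySem.List.pyGetD_of_nonneg _ _ (by omega : (0:Int) ≤ (k : Int))]
      simp
  rw [← hA, ← hB]
  exact foldl_min_eq_of_mem_iff LA LB 100 hmem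

-- ===== VERDICT (by name: the statement is the Claim_ definition above) =====
theorem peopleA_eq (it : List (String × Int)) :
    it.foldl (fun acc p => (PySem.List.pyRange 0 p.2).foldl (fun a _ => a ++ [p.1]) acc) []
      = it.flatMap (fun p => (PySem.List.pyRange 0 p.2).map (fun _ => p.1)) := by
  have h1 : (fun (acc : List String) (p : String × Int) =>
        (PySem.List.pyRange 0 p.2).foldl (fun a _ => a ++ [p.1]) acc)
      = (fun acc p => acc ++ (PySem.List.pyRange 0 p.2).map (fun _ => p.1)) := by
    funext acc p
    exact PySem.List.foldl_append_singleton_eq_map (fun _ => p.1) _ acc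
  rw [h1, PySem.List.foldl_append_eq_flatMap, List.nil_append]

theorem solution_spec : Claim_equal_solution := by
  intro n l hdom hpre
  unfold Spec_solution
  have hd := aCount_eq l PySem.Dict.empty PySem.Dict.nodup_keys_empty
    (fun k => by rw [PySem.Dict.getD_empty]; omega)
  have hbc : List.foldl (fun d m => PySem.Dict.insert d m (PySem.Dict.getD d m 0 + 1))
      PySem.Dict.empty l = bCounts l := rfl
  rw [hbc] at hd
  show solution n l = solution_alt n l
  rw [solution, solution_alt]
  dsimp only
  by_cases hany : (PySem.Dict.values (bCounts l)).any (fun c => decide (4 ≤ c)) = true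
  · rw [show aCount PySem.Dict.empty l = none by rw [hd, if_pos hany], if_pos hany]
  · rw [show aCount PySem.Dict.empty l = some (bCounts l) by rw [hd, if_neg hany],
        if_neg hany]
    dsimp only
    rw [peopleA_eq]
    exact min_part_eq _
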